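-- pv_equiv track=rewrite | github.com/Alexlandeau/advent_of_code_2022 | day_3/day_3.py | find_common_item
-- ===== SOURCE A (Python) =====
-- def find_common_item(compartments):
--     if len(compartments) < 2:
--         raise Exception
--     else:
--         for item in compartments[0]:
--             if all([item in compartment for compartment in compartments[1:]]):
--                 return item
--         raise Exception("No duplicate item found")
-- ===== SOURCE B (Python) =====
-- def find_common_item(compartments):
--     if len(compartments) < 2:
--         raise Exception
--     common = set(compartments[0]).intersection(*compartments[1:])
--     for item in compartments[0]:
--         if item in common:
--             return item
--     raise Exception("No duplicate item found")
-- ===== Notes on version B (the rewrite author's own statement) =====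
-- stated objective: simpler
-- what changed: B folds all compartments into one intersection set up front and then scans compartments[0] once with a membership test, instead of A's nested re-scan of every other compartment for each candidate item.
import Mathlib
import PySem

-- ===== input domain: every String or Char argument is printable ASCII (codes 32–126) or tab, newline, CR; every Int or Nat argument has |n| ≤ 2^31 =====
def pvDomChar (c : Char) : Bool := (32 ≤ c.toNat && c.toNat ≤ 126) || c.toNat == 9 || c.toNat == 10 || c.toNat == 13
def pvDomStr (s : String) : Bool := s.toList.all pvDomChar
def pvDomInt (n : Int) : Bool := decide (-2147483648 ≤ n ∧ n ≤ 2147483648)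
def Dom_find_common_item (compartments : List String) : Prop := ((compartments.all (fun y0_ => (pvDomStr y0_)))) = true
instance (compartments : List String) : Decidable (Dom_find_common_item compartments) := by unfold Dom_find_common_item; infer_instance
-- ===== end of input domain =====

-- B replaces A's nested rescan (for each item, re-check every other compartment) by one
-- intersection set built up front followed by a single membership scan of compartments[0];
-- objective: simpler. Both exception sites of A are excluded by Pre_.

-- ===== PORT A =====
-- loop 'for item in compartments[0]: if all([item in c for c in compartments[1:]]): return item'
-- ('item in c' for a single char is exactly char membership, ported as toList.contains)
def findLoopA (rest : List String) : List Char → String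
  | [] => ""            -- raise Exception("No duplicate item found"): excluded by Pre_
  | c :: cs =>
      if (rest.map (fun comp => comp.toList.contains c)).all (fun b => b) then String.ofList [c]
      else findLoopA rest cs

def find_common_item (compartments : List String) : String :=
  if compartments.length < 2 then ""   -- raise Exception: excluded by Pre_
  else findLoopA (compartments.drop 1) ((compartments.headD "").toList)
  -- compartments[1:] = drop 1; compartments[0] = headD "" (safe: length ≥ 2 in this branch)

-- ===== PORT B =====
-- 'for item in compartments[0]: if item in common: return item'
def findLoopB (common : PySem.Set Char) : List Char → String
  | [] => ""            -- raise Exception("No duplicate item found"): excluded by Pre_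
  | c :: cs => if common.contains c then String.ofList [c] else findLoopB common cs

def find_common_item_alt (compartments : List String) : String :=
  if compartments.length < 2 then ""   -- raise Exception: excluded by Pre_
  else
    -- common = set(compartments[0]).intersection(*compartments[1:])
    let common : PySem.Set Char :=
      (compartments.drop 1).foldl (fun s comp => PySem.Set.inter s comp.toList)
        (PySem.Set.ofList ((compartments.headD "").toList))
    findLoopB common ((compartments.headD "").toList)

-- ===== PRECONDITION & SPEC =====
-- Pre_ excludes exactly the inputs where Python A raises: fewer than two compartments, or no
-- character of compartments[0] occurring in all the others.
def Pre_find_common_item (compartments : List String) : Prop :=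
  2 ≤ compartments.length ∧
  ((compartments.headD "").toList.any
    (fun c => (compartments.drop 1).all (fun comp => comp.toList.contains c))) = true
instance (compartments : List String) : Decidable (Pre_find_common_item compartments) := by
  unfold Pre_find_common_item; infer_instance

def pvWitness_find_common_item : List String := ["vJrwpWtwJgWr", "hcsFMMfFFhFp"]

def Spec_find_common_item (compartments : List String) (out : String) : Prop :=
  out = find_common_item_alt compartments
instance (compartments : List String) (out : String) : Decidable (Spec_find_common_item compartments out) := by
  unfold Spec_find_common_item; infer_instance

-- ===== CLAIM (what is proved, stated in full; the proofs are below) =====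
def Claim_equal_find_common_item : Prop :=
  ∀ (compartments : List String), Dom_find_common_item compartments →
    Pre_find_common_item compartments →
    Spec_find_common_item compartments (find_common_item compartments)

-- ===== LEMMAS AND PROOFS =====

theorem contains_inter {s : PySem.Set Char} {t : List Char} {c : Char} :
    (PySem.Set.inter s t).contains c = (s.contains c && t.contains c) := by
  rcases hs : s.contains c with _ | _ <;> rcases ht : t.contains c with _ | _ <;>
    simp_all [PySem.Set.inter, PySem.Set.contains, List.mem_filter]

theorem contains_interFold (rest : List String) (init : PySem.Set Char) (c : Char) :
    (rest.foldl (fun s comp => PySem.Set.inter s comp.toList) init).contains c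
      = (init.contains c && rest.all (fun comp => comp.toList.contains c)) := by
  induction rest generalizing init with
  | nil => simp
  | cons r rs ih =>
      simp only [List.foldl_cons, List.all_cons, ih, contains_inter, Bool.and_assoc]

theorem loopB_eq_loopA (rest : List String) (init : PySem.Set Char) (l : List Char)
    (h : ∀ c ∈ l, init.contains c = true) :
    findLoopB (rest.foldl (fun s comp => PySem.Set.inter s comp.toList) init) l
      = findLoopA rest l := by
  induction l with
  | nil => rfl
  | cons c cs ih =>
      have hc : init.contains c = true := h c (by simp)
      have hrec := ih (fun d hd => h d (by simp [hd]))
      simp only [findLoopA, findLoopB, contains_interFold, hc, Bool.true_and,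
        List.all_map, Function.comp_def, hrec]

-- ===== VERDICT (by name: the statement is the Claim_ definition above) =====
theorem find_common_item_spec : Claim_equal_find_common_item := by
  intro compartments _dom pre
  unfold Spec_find_common_item find_common_item find_common_item_alt
  split
  · rfl
  · exact (loopB_eq_loopA _ _ _ (fun c hc => by
      simpa [PySem.Set.contains] using ((PySem.Set.mem_ofList _ c).mpr hc))).symm
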